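-- pv_equiv track=rewrite | github.com/dejiehu/Equivalence_division | part2/part2_7_positive_lsit_1.py | pos
-- ===== SOURCE A (Python) =====
-- def pos(dec_divlist,con_divlist):  #子集  正域集合
--     pos_list=[]
--     temp_con_divlist = [con_divlist[i][:] for i in range(len(con_divlist))]
--     for i in dec_divlist:
--          for j in range(len(temp_con_divlist)-1,-1,-1):
--             if set(temp_con_divlist[j]).issubset(i):
--                 pos_list += temp_con_divlist[j]
--                 del temp_con_divlist[j]
--     return  pos_list
-- ===== SOURCE B (Python) =====
-- def pos(dec_divlist, con_divlist):
--     # Bucket each condition block under the first decision block it is a subset of,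
--     # then emit buckets in decision order (blocks within a bucket in reverse index order).
--     dec_sets = [set(d) for d in dec_divlist]
--     buckets = [[] for _ in dec_divlist]
--     for block in reversed(con_divlist):
--         for d, s in enumerate(dec_sets):
--             if all(x in s for x in block):
--                 buckets[d].append(block)
--                 break
--     out = []
--     for bs in buckets:
--         for b in bs:
--             out += b
--     return out
-- ===== Notes on version B (the rewrite author's own statement) =====
-- stated objective: faster
-- what changed: Instead of repeatedly rescanning and destructively deleting from the condition-block list per decision block, B precomputes each decision block's set once, assigns every condition block to the first decision block containing it in one reversed pass, and emits the buckets in decision order.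
import Mathlib
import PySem

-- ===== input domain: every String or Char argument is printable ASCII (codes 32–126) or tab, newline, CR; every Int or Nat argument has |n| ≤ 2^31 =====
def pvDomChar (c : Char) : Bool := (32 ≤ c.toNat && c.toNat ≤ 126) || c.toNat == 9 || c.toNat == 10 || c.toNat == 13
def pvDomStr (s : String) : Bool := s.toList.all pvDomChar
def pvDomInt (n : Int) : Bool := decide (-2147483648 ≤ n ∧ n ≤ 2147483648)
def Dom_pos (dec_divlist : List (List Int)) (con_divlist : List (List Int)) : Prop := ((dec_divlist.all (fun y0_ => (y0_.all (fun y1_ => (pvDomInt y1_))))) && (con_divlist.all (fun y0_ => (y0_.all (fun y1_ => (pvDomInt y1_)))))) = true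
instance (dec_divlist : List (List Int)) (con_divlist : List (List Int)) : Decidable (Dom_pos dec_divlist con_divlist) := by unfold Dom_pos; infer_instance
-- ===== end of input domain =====

-- B replaces A's destructive reversed-index scan (with `del`) repeated per decision block by a
-- single pass that buckets each condition block under its first matching decision block; objective: alternative.

-- ===== PORT A =====
-- inner loop `for j in range(len(temp)-1,-1,-1): if set(temp[j]).issubset(i): pos_list += temp[j]; del temp[j]`:
-- j runs right-to-left and `del` at j never touches indices < j, so it is this structural
-- right-to-left recursion returning (elements appended, in descending-index order; surviving blocks, in order)
def posInner (i : List Int) : List (List Int) → List Int × List (List Int)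
  | [] => ([], [])
  | b :: rest =>
    let p := posInner i rest
    if PySem.Set.issubset (PySem.Set.ofList b) i then (p.1 ++ b, p.2) else (p.1, b :: p.2)

def pos (dec_divlist : List (List Int)) (con_divlist : List (List Int)) : List Int :=
  -- temp_con_divlist = [con_divlist[i][:] …] is a fresh copy of con_divlist (aliasing is irrelevant here)
  (dec_divlist.foldl
    (fun st i => let p := posInner i st.2; (st.1 ++ p.1, p.2))
    (([] : List Int), con_divlist)).1

-- ===== PORT B =====
def pos_alt (dec_divlist : List (List Int)) (con_divlist : List (List Int)) : List Int :=
  let decSets := dec_divlist.map (fun d => PySem.Set.ofList d)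
  -- `for d, s in enumerate(dec_sets): if all(x in s for x in block): buckets[d].append(block); break` = findIdx?
  let buckets := con_divlist.reverse.foldl
    (fun bks block =>
      match decSets.findIdx? (fun s => block.all (fun x => PySem.Set.contains s x)) with
      | some d => bks.set d (bks.getD d [] ++ [block])
      | none => bks)
    (dec_divlist.map (fun _ => ([] : List (List Int))))
  buckets.foldl (fun out bs => bs.foldl (fun o b => o ++ b) out) []

-- ===== PRECONDITION & SPEC =====
def Spec_pos (dec_divlist : List (List Int)) (con_divlist : List (List Int)) (out : List Int) : Prop := out = pos_alt dec_divlist con_divlist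
instance (dec_divlist : List (List Int)) (con_divlist : List (List Int)) (out : List Int) : Decidable (Spec_pos dec_divlist con_divlist out) := by unfold Spec_pos; infer_instance

-- ===== CLAIM (what is proved, stated in full; the proofs are below) =====
def Claim_equal_pos : Prop := ∀ (dec_divlist : List (List Int)) (con_divlist : List (List Int)), Dom_pos dec_divlist con_divlist → Spec_pos dec_divlist con_divlist (pos dec_divlist con_divlist)

-- ===== LEMMAS AND PROOFS =====

-- canonical subset test: every element of b occurs in i
def pvSub (b i : List Int) : Bool := b.all (fun x => i.contains x)

-- index of the first decision block a condition block is a subset of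
def pvFidx (ds : List (List Int)) (b : List Int) : Option Nat := ds.findIdx? (fun i => pvSub b i)

-- reference function both ports are reduced to
def pvSpec : List (List Int) → List (List Int) → List Int
  | [], _ => []
  | i :: ds, temp =>
      ((temp.filter (fun b => pvSub b i)).reverse).flatten
        ++ pvSpec ds (temp.filter (fun b => !pvSub b i))

theorem pvSub_issubset (b i : List Int) :
    PySem.Set.issubset (PySem.Set.ofList b) i = pvSub b i := by
  rw [Bool.eq_iff_iff]
  simp [PySem.Set.issubset_iff, pvSub, List.all_eq_true, PySem.Set.mem_ofList]

theorem pvContains_ofList (d : List Int) (x : Int) :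
    PySem.Set.contains (PySem.Set.ofList d) x = d.contains x := by
  rw [Bool.eq_iff_iff]
  simp [PySem.Set.contains, PySem.Set.mem_ofList]

theorem posInner_eq (i : List Int) (temp : List (List Int)) :
    posInner i temp =
      (((temp.filter (fun b => pvSub b i)).reverse).flatten,
        temp.filter (fun b => !pvSub b i)) := by
  induction temp with
  | nil => rfl
  | cons b rest ih =>
    simp only [posInner, ih, pvSub_issubset, List.filter_cons]
    cases pvSub b i <;> simp

theorem pos_fold (ds : List (List Int)) : ∀ (temp : List (List Int)) (acc : List Int),
    ds.foldl (fun st i => let p := posInner i st.2; (st.1 ++ p.1, p.2)) (acc, temp)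
      = (acc ++ pvSpec ds temp, temp.filter (fun b => ds.all (fun i => !pvSub b i))) := by
  induction ds with
  | nil => intro temp acc; simp [pvSpec]
  | cons i ds ih =>
    intro temp acc
    rw [List.foldl_cons]
    have hstep : (let p := posInner i (acc, temp).2; ((acc, temp).1 ++ p.1, p.2))
        = (acc ++ (temp.filter (fun b => pvSub b i)).reverse.flatten,
            temp.filter (fun b => !pvSub b i)) := by
      simp [posInner_eq]
    rw [hstep, ih, pvSpec]
    simp only [Prod.mk.injEq]
    refine ⟨by rw [List.append_assoc], ?_⟩
    rw [List.filter_filter]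
    exact List.filter_congr (fun b _ => by rw [List.all_cons]; exact Bool.and_comm _ _)

theorem pos_eq_pvSpec (dec con : List (List Int)) : pos dec con = pvSpec dec con := by
  unfold pos
  rw [pos_fold]
  simp

theorem pvFidx_cons_zero (i : List Int) (ds : List (List Int)) (b : List Int) :
    decide (pvFidx (i :: ds) b = some 0) = pvSub b i := by
  cases h : pvSub b i <;> simp [pvFidx, List.findIdx?_cons, h]

theorem pvFidx_lt (ds : List (List Int)) (b : List Int) (d : Nat)
    (h : pvFidx ds b = some d) : d < ds.length := by
  have := List.findIdx?_eq_some_iff_findIdx_eq.mp h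
  omega

theorem pvFindIdx?_map {α β : Type} (f : α → β) (p : β → Bool) (l : List α) :
    (l.map f).findIdx? p = l.findIdx? (fun x => p (f x)) := by
  induction l with
  | nil => rfl
  | cons a l ih => simp [List.findIdx?_cons, ih]

-- the bucket-building fold of port B, characterised per index
theorem bucket_fold (g : List Int → Option Nat) (L : List (List Int)) :
    ∀ (bks : List (List (List Int))),
      (∀ b d, g b = some d → d < bks.length) →
      (L.foldl (fun bks block =>
          match g block with
          | some d => bks.set d (bks.getD d [] ++ [block])
          | none => bks) bks).length = bks.length ∧
      ∀ d, d < bks.length →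
        (L.foldl (fun bks block =>
            match g block with
            | some d => bks.set d (bks.getD d [] ++ [block])
            | none => bks) bks).getD d []
          = bks.getD d [] ++ (L.filter (fun b => decide (g b = some d))) := by
  induction L with
  | nil => intro bks _; exact ⟨rfl, fun d _ => by simp⟩
  | cons block L ih =>
    intro bks hg
    rw [List.foldl_cons]
    cases hgb : g block with
    | none =>
      obtain ⟨h1, h2⟩ := ih bks hg
      refine ⟨?_, fun d hd => ?_⟩
      · exact h1
      · show (L.foldl _ bks).getD d [] = _
        rw [h2 d hd, List.filter_cons]
        have hc : decide (g block = some d) = false := by simp [hgb]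
        rw [hc]
        simp
    | some e =>
      have he : e < bks.length := hg block e hgb
      obtain ⟨h1, h2⟩ := ih (bks.set e (bks.getD e [] ++ [block]))
        (by intro b d h; rw [List.length_set]; exact hg b d h)
      refine ⟨?_, fun d hd => ?_⟩
      · show (L.foldl _ (bks.set e (bks.getD e [] ++ [block]))).length = bks.length
        rw [h1, List.length_set]
      · have hd' : d < (bks.set e (bks.getD e [] ++ [block])).length := by
          rw [List.length_set]; exact hd
        show (L.foldl _ (bks.set e (bks.getD e [] ++ [block]))).getD d [] = _
        rw [h2 d hd', List.filter_cons]
        have hstep : (bks.set e (bks.getD e [] ++ [block])).getD d [] =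
            if e = d then bks.getD d [] ++ [block] else bks.getD d [] := by
          rw [List.getD_eq_getElem _ _ hd', List.getD_eq_getElem _ _ hd, List.getElem_set]
          split
          · next h => subst h; rw [List.getD_eq_getElem _ _ he]
          · rfl
        rw [hstep]
        by_cases hed : e = d
        · subst hed
          have hc : decide (g block = some e) = true := by simp [hgb]
          rw [hc]
          simp
        · have hc : decide (g block = some d) = false := by simp [hgb, hed]
          rw [hc]
          simp [hed]

theorem pvRangeMap (l : List (List (List Int))) (n : Nat) (h : l.length = n) :
    l = (List.range n).map (fun d => l.getD d []) := by
  subst h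
  refine List.ext_getElem (by simp) ?_
  intro i h1 h2
  rw [List.getElem_map, List.getElem_range, List.getD_eq_getElem _ _ h1]

theorem pvSpec_eq (ds : List (List Int)) : ∀ (temp : List (List Int)),
    pvSpec ds temp
      = ((List.range ds.length).map
          (fun d => (temp.reverse.filter (fun b => decide (pvFidx ds b = some d))).flatten)).flatten := by
  induction ds with
  | nil => intro temp; rfl
  | cons i ds ih =>
    intro temp
    rw [pvSpec, List.length_cons, List.range_succ_eq_map, List.map_cons, List.flatten_cons,
      List.map_map]
    have h0 : List.filter (fun b => decide (pvFidx (i :: ds) b = some 0)) temp.reverse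
        = (List.filter (fun b => pvSub b i) temp).reverse := by
      rw [List.filter_reverse]
      exact congrArg List.reverse (List.filter_congr (fun b _ => pvFidx_cons_zero i ds b))
    rw [h0]
    congr 1
    rw [ih]
    congr 1
    refine List.map_congr_left (fun d _ => ?_)
    simp only [Function.comp_apply, Nat.succ_eq_add_one]
    congr 1
    rw [List.filter_reverse, List.filter_reverse, List.filter_filter]
    exact congrArg List.reverse (List.filter_congr (fun b _ => by
      cases h : pvSub b i <;> simp [pvFidx, List.findIdx?_cons, h]))

theorem pos_alt_eq_pvSpec (dec con : List (List Int)) : pos_alt dec con = pvSpec dec con := by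
  unfold pos_alt
  have hpred : ∀ (block : List Int),
      (dec.map (fun d => PySem.Set.ofList d)).findIdx?
          (fun s => block.all (fun x => PySem.Set.contains s x)) = pvFidx dec block := by
    intro block
    rw [pvFindIdx?_map]
    simp only [pvContains_ofList]
    rfl
  simp only [hpred]
  have hinit : (dec.map (fun _ => ([] : List (List Int)))).length = dec.length := by simp
  obtain ⟨hlen, hget⟩ := bucket_fold (pvFidx dec) con.reverse
    (dec.map (fun _ => ([] : List (List Int))))
    (by intro b d h; rw [hinit]; exact pvFidx_lt dec b d h)
  rw [show (fun (out : List Int) (bs : List (List Int)) => List.foldl (fun o b => o ++ b) out bs)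
      = (fun (out : List Int) (bs : List (List Int)) => out ++ bs.flatten) from
    funext fun out => funext fun bs => PySem.List.foldl_append_eq_flatten bs out]
  rw [PySem.List.foldl_append_eq_flatMap List.flatten]
  rw [List.nil_append, List.flatMap_def]
  set buckets := con.reverse.foldl
    (fun bks block =>
      match pvFidx dec block with
      | some d => bks.set d (bks.getD d [] ++ [block])
      | none => bks)
    (dec.map (fun _ => ([] : List (List Int)))) with hbuckets
  have hblen : buckets.length = dec.length := by rw [hlen, hinit]
  rw [pvRangeMap buckets dec.length hblen, pvSpec_eq, List.map_map]
  have hzero : ∀ d : Nat, (dec.map (fun _ => ([] : List (List Int)))).getD d [] = [] := by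
    intro d
    simp only [List.getD, List.getElem?_map]
    cases dec[d]? <;> rfl
  congr 1
  refine List.map_congr_left (fun d hd => ?_)
  have hdn : d < dec.length := List.mem_range.mp hd
  simp only [Function.comp_apply]
  rw [hget d (by rw [hinit]; exact hdn), hzero d, List.nil_append]

-- ===== VERDICT (by name: the statement is the Claim_ definition above) =====
theorem pos_spec : Claim_equal_pos := by
  intro dec con _
  unfold Spec_pos
  rw [pos_eq_pvSpec, pos_alt_eq_pvSpec]
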